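-- pv_equiv track=rewrite | github.com/907riley/CPSC322-Disc-Golf-Project | mysklearn/pokemonDiscretizers.py | base_total_discretizer
-- ===== SOURCE A (Python) =====
-- def base_total_discretizer(x):
--     """Runs a list of bast_total values through a discretizer
--        [180.0, 300.0, 420.0, 540.0, 660.0, 780.0]
--     Args:
--         x (list): the list of values to discretize
--     Returns:
--         classification: The list of discretizied values
--     """
--     classification = []
--     for val in x:
--         if val > 660:
--             classification.append(5)
--         elif val > 540:
--             classification.append(4)
--         elif val > 420:
--             classification.append(3)
--         elif val > 300:
--             classification.append(2)
--         else:
--             classification.append(1)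
--     return classification
-- ===== SOURCE B (Python) =====
-- _THRESHOLDS = [300, 420, 540, 660]
--
-- def _bisect_left(a, v):
--     lo, hi = 0, len(a)
--     while lo < hi:
--         mid = (lo + hi) // 2
--         if a[mid] < v:
--             lo = mid + 1
--         else:
--             hi = mid
--     return lo
--
-- def base_total_discretizer(x):
--     return [_bisect_left(_THRESHOLDS, val) + 1 for val in x]
-- ===== Notes on version B (the rewrite author's own statement) =====
-- stated objective: alternative
-- what changed: Replaces the five-way comparison cascade with a sorted four-element threshold table and a hand-written bisect_left binary search; each value's class is its insertion index plus one.
import Mathlib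
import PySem

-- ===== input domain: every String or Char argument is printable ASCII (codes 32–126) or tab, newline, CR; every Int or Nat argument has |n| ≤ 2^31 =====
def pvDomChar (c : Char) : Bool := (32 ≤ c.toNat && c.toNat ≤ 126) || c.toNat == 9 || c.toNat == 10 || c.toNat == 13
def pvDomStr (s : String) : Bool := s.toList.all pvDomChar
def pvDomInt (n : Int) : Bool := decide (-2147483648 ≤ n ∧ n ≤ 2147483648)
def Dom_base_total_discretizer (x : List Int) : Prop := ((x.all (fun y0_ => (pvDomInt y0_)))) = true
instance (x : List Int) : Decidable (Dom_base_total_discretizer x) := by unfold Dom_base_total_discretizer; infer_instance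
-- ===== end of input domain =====

-- B replaces A's comparison cascade with a sorted threshold table and a binary search (alternative decomposition, same cost).
-- ===== PORT A =====
def base_total_discretizer (x : List Int) : List Int :=
  x.foldl (fun classification val =>
    classification ++ [if val > 660 then 5
      else if val > 540 then 4
      else if val > 420 then 3
      else if val > 300 then 2
      else 1]) []

-- ===== PORT B =====
def pvThresholds : List Int := [300, 420, 540, 660]

-- hand-ported step for step from Source B's _bisect_left while-loop (lo, hi = 0, len(a); mid = (lo+hi)//2);
-- the fuel argument only bounds the loop (hi - lo shrinks each pass, so fuel = len(a) is never exhausted),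
-- and lo/hi stay in range so the getD default is never read
def pvBisectLeftGo (a : List Int) (v : Int) : Nat → Nat → Nat → Nat
  | 0, lo, _ => lo
  | fuel + 1, lo, hi =>
    if lo < hi then
      let mid := (lo + hi) / 2
      if a.getD mid 0 < v then pvBisectLeftGo a v fuel (mid + 1) hi
      else pvBisectLeftGo a v fuel lo mid
    else lo

def pvBisectLeft (a : List Int) (v : Int) : Nat := pvBisectLeftGo a v a.length 0 a.length

def base_total_discretizer_alt (x : List Int) : List Int :=
  x.map (fun val => (pvBisectLeft pvThresholds val : Nat) + 1)

-- ===== PRECONDITION & SPEC =====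
def Spec_base_total_discretizer (x : List Int) (out : List Int) : Prop := out = base_total_discretizer_alt x
instance (x : List Int) (out : List Int) : Decidable (Spec_base_total_discretizer x out) := by unfold Spec_base_total_discretizer; infer_instance

-- ===== CLAIM (what is proved, stated in full; the proofs are below) =====
def Claim_equal_base_total_discretizer : Prop := ∀ (x : List Int), Dom_base_total_discretizer x → Spec_base_total_discretizer x (base_total_discretizer x)

-- ===== LEMMAS AND PROOFS =====

-- ===== VERDICT (by name: the statement is the Claim_ definition above) =====
lemma pvBisect_eq (v : Int) :
    ((pvBisectLeft pvThresholds v : Nat) : Int) + 1 =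
      (if v > 660 then 5 else if v > 540 then 4 else if v > 420 then 3
       else if v > 300 then 2 else 1 : Int) := by
  by_cases h4 : 660 < v
  · have h3 : (540:Int) < v := by omega
    norm_num [pvBisectLeft, pvBisectLeftGo, pvThresholds, h3, h4]
  · by_cases h3 : 540 < v
    · norm_num [pvBisectLeft, pvBisectLeftGo, pvThresholds, h3, h4]
    · by_cases h2 : 420 < v
      · norm_num [pvBisectLeft, pvBisectLeftGo, pvThresholds, h2, h3, h4]
      · by_cases h1 : 300 < v
        · norm_num [pvBisectLeft, pvBisectLeftGo, pvThresholds, h1, h2, h3, h4]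
        · norm_num [pvBisectLeft, pvBisectLeftGo, pvThresholds, h1, h2, h3, h4]

theorem base_total_discretizer_spec : Claim_equal_base_total_discretizer := by
  intro x _
  unfold Spec_base_total_discretizer base_total_discretizer base_total_discretizer_alt
  rw [PySem.List.foldl_append_singleton_eq_map]
  exact List.map_congr_left (fun v _ => (pvBisect_eq v).symm)
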